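-- pv_equiv track=rewrite | github.com/ANnthomgamer/IAW | 2026-02-19/Python3/cadenas.py | cifrado_cesar_vocales
-- ===== SOURCE A (Python) =====
-- def cifrado_cesar_vocales(cadena):
--     cadena_cifrada = ""
--     vocales = ["a", "e", "i", "o", "u"]
--     for letra in cadena:
--         if letra in vocales:
--             posicion = vocales.index(letra)
--             nueva_posicion = (posicion + 1) % 5
--             cadena_cifrada += vocales[nueva_posicion]
--         else:
--             cadena_cifrada += letra
--
--     return [cadena, cadena_cifrada]
-- ===== SOURCE B (Python) =====
-- _T = str.maketrans("aeiou", "eioua")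
--
-- def cifrado_cesar_vocales(cadena):
--     return [cadena, cadena.translate(_T)]
-- ===== Notes on version B (the rewrite author's own statement) =====
-- stated objective: idiomatic
-- what changed: Replaces the explicit per-character loop with membership test, list.index and modular arithmetic by a fixed translation table built once with str.maketrans and a single C-level str.translate call.
import Mathlib
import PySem

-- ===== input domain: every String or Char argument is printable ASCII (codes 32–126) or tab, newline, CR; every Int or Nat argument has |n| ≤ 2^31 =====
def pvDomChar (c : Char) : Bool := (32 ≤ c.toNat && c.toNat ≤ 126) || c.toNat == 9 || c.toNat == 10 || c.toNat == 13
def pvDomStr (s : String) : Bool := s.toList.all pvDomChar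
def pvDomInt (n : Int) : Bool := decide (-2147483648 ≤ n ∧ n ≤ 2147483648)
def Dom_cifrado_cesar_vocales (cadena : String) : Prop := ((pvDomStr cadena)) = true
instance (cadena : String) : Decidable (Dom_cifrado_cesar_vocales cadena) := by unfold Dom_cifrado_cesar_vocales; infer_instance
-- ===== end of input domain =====

-- B replaces A's explicit loop (membership test + list.index + modular arithmetic per character)
-- by a fixed translation table applied in one str.translate-style pass; objective: idiomatic.
-- Both ports build strings as List Char (PySem convention; Lean's String.append is kernel-opaque).

-- ===== PORT A =====
-- vocales = ["a", "e", "i", "o", "u"]  (one-char strings, as List Char each)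
def pvVocales : List (List Char) := [['a'], ['e'], ['i'], ['o'], ['u']]

-- the body of A's for-loop, acting on the accumulator cadena_cifrada
def pvStepA (acc : List Char) (letra : Char) : List Char :=
  if [letra] ∈ pvVocales then
    match PySem.List.index? pvVocales [letra] with
    | some posicion =>
        acc ++ PySem.List.pyGetD pvVocales (PySem.Int.mod ((posicion : Int) + 1) 5) []
    | none => acc      -- unreachable: index follows a successful membership test
  else acc ++ [letra]

def cifrado_cesar_vocales (cadena : String) : List String :=
  [cadena, String.ofList (cadena.toList.foldl pvStepA [])]

-- ===== PORT B =====
-- the translation table built once by str.maketrans("aeiou", "eioua")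
def pvTable : List (Char × Char) := [('a','e'), ('e','i'), ('i','o'), ('o','u'), ('u','a')]

def pvTranslate (c : Char) : Char := (pvTable.lookup c).getD c

def cifrado_cesar_vocales_alt (cadena : String) : List String :=
  [cadena, String.ofList (cadena.toList.map pvTranslate)]

-- ===== PRECONDITION & SPEC =====
def Spec_cifrado_cesar_vocales (cadena : String) (out : List String) : Prop := out = cifrado_cesar_vocales_alt cadena
instance (cadena : String) (out : List String) : Decidable (Spec_cifrado_cesar_vocales cadena out) := by unfold Spec_cifrado_cesar_vocales; infer_instance

-- ===== CLAIM (what is proved, stated in full; the proofs are below) =====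
def Claim_equal_cifrado_cesar_vocales : Prop := ∀ (cadena : String), Dom_cifrado_cesar_vocales cadena → Spec_cifrado_cesar_vocales cadena (cifrado_cesar_vocales cadena)

-- ===== LEMMAS AND PROOFS =====

-- one loop iteration of A appends exactly the translated character
theorem pvStepA_vowel (c : Char) (k : Nat) (acc : List Char)
    (h1 : ([c] ∈ pvVocales) = True)
    (h2 : PySem.List.index? pvVocales [c] = some k)
    (h3 : PySem.List.pyGetD pvVocales (PySem.Int.mod (((k : Nat) : Int) + 1) 5) [] = [pvTranslate c]) :
    pvStepA acc c = acc ++ [pvTranslate c] := by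
  simp only [pvStepA, h1, if_true, h2]
  rw [h3]

theorem pvStepA_eq (acc : List Char) (c : Char) :
    pvStepA acc c = acc ++ [pvTranslate c] := by
  by_cases ha : c = 'a'; · subst ha; exact pvStepA_vowel _ 0 acc (by decide) (by decide) (by decide)
  by_cases he : c = 'e'; · subst he; exact pvStepA_vowel _ 1 acc (by decide) (by decide) (by decide)
  by_cases hi : c = 'i'; · subst hi; exact pvStepA_vowel _ 2 acc (by decide) (by decide) (by decide)
  by_cases ho : c = 'o'; · subst ho; exact pvStepA_vowel _ 3 acc (by decide) (by decide) (by decide)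
  by_cases hu : c = 'u'; · subst hu; exact pvStepA_vowel _ 4 acc (by decide) (by decide) (by decide)
  have hm : [c] ∉ pvVocales := by
    simp only [pvVocales, List.mem_cons, List.cons.injEq, and_true]
    push Not
    exact ⟨ha, he, hi, ho, by simp [hu]⟩
  have ht : pvTranslate c = c := by
    simp only [pvTranslate, pvTable, List.lookup]
    rw [show (c == 'a') = false from by simp [ha], show (c == 'e') = false from by simp [he],
        show (c == 'i') = false from by simp [hi], show (c == 'o') = false from by simp [ho],
        show (c == 'u') = false from by simp [hu]]
    rfl
  simp [pvStepA, hm, ht]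

theorem pvFoldA_eq (l : List Char) (acc : List Char) :
    l.foldl pvStepA acc = acc ++ l.map pvTranslate := by
  induction l generalizing acc with
  | nil => simp
  | cons c l ih =>
      simp [List.foldl_cons, pvStepA_eq, ih, List.append_assoc]

-- ===== VERDICT (by name: the statement is the Claim_ definition above) =====
theorem cifrado_cesar_vocales_spec : Claim_equal_cifrado_cesar_vocales := by
  intro cadena _
  unfold Spec_cifrado_cesar_vocales cifrado_cesar_vocales cifrado_cesar_vocales_alt
  rw [pvFoldA_eq]
  simp
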